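-- pv_equiv track=rewrite | github.com/Muzammilyousaf/hospital-ai-chatbot | app.py | format_faq_response
-- ===== SOURCE A (Python) =====
-- def format_faq_response(context, query):
--     """Format FAQ response in a natural, conversational way."""
--     # Remove redundant headers
--     context = context.replace("HOSPITAL INFORMATION", "").strip()
--     context = context.replace("DEPARTMENTS:", "").strip()
--
--     # Extract the most relevant sentence or paragraph
--     sentences = context.split('.')
--     query_lower = query.lower()
--
--     # Find sentences that contain keywords from the query
--     relevant_sentences = []
--     query_words = set(query_lower.split())
--
--     for sentence in sentences:
--         sentence_lower = sentence.lower()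
--         # Count how many query words appear in this sentence
--         matches = sum(1 for word in query_words if word in sentence_lower and len(word) > 2)
--         if matches > 0:
--             relevant_sentences.append((matches, sentence.strip()))
--
--     # Sort by relevance and take top 2-3 sentences
--     relevant_sentences.sort(reverse=True, key=lambda x: x[0])
--
--     if relevant_sentences:
--         answer = '. '.join([s[1] for s in relevant_sentences[:3] if s[1]])
--         if answer:
--             return answer + '.'
--
--     # Fallback: return first meaningful sentence
--     for sentence in sentences:
--         if len(sentence.strip()) > 20:
--             return sentence.strip() + '.'
--
--     return context[:200] + '...' if len(context) > 200 else context
-- ===== SOURCE B (Python) =====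
-- def format_faq_response(context, query):
--     """Format FAQ response: bucket matching sentences by match-count (counting
--     sort) instead of comparison-sorting the relevance list."""
--     context = context.replace("HOSPITAL INFORMATION", "").strip()
--     context = context.replace("DEPARTMENTS:", "").strip()
--
--     sentences = context.split('.')
--     # Pre-filter the query words once: only words longer than 2 chars can match.
--     keywords = set(w for w in query.lower().split() if len(w) > 2)
--
--     relevant = []
--     maxc = 0
--     for sentence in sentences:
--         sentence_lower = sentence.lower()
--         matches = sum(1 for w in keywords if w in sentence_lower)
--         if matches > 0:
--             relevant.append((matches, sentence.strip()))
--             if matches > maxc: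
--                 maxc = matches
--
--     if relevant:
--         # Counting-sort selection: walk match-counts from the maximum down to 1,
--         # keeping original order inside each bucket (= stable reverse sort).
--         ordered = []
--         c = maxc
--         while c > 0:
--             ordered.extend(s for (m, s) in relevant if m == c)
--             c -= 1
--         answer = '. '.join(s for s in ordered[:3] if s)
--         if answer:
--             return answer + '.'
--
--     stripped = next((s.strip() for s in sentences if len(s.strip()) > 20), None)
--     if stripped is not None:
--         return stripped + '.'
--     return context[:200] + '...' if len(context) > 200 else context
-- ===== Notes on version B (the rewrite author's own statement) =====
-- stated objective: alternative
-- what changed: Replaces the stable reverse comparison-sort of the (matches, sentence) list with a counting-sort selection: query words are pre-filtered once by length, sentences are bucketed by match-count, and buckets are concatenated from the maximum count down to 1 (original order inside each bucket reproduces the stable tie order).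
import Mathlib
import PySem

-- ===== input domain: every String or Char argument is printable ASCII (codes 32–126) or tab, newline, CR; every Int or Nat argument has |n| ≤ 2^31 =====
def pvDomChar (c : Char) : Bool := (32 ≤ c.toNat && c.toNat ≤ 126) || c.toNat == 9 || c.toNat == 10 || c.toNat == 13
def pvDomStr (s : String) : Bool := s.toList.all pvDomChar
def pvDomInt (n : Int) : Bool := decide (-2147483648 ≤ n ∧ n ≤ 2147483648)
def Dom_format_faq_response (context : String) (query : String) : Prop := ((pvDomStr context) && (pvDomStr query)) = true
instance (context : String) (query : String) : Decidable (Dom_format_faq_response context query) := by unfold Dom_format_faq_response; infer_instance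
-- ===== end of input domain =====

-- B replaces A's stable reverse sort of the (matches, sentence) list by a counting-sort
-- bucket selection (match-counts walked from the maximum down to 1) and pre-filters the
-- query words by length once; same return value (objective: alternative).

-- ===== PORT A =====
-- sum(1 for word in query_words if word in sentence_lower and len(word) > 2)
def pvMatchesA (qws : List String) (sl : String) : Int :=
  qws.foldl (fun n w =>
    if PySem.Str.isIn w sl && decide ((2 : Int) < PySem.Str.len w) then n + 1 else n) 0

-- fallback loop: first sentence whose strip() is longer than 20, returned stripped + '.'
def pvFirstLongA : List String → Option String
  | [] => none
  | s :: rest =>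
    if (20 : Int) < PySem.Str.len (PySem.Str.strip s) then some (PySem.Str.strip s ++ ".")
    else pvFirstLongA rest

def format_faq_response (context : String) (query : String) : String :=
  let context1 := PySem.Str.strip (PySem.Str.replace context "HOSPITAL INFORMATION" "")
  let context2 := PySem.Str.strip (PySem.Str.replace context1 "DEPARTMENTS:" "")
  let sentences := (PySem.Str.split? context2 ".").getD []   -- sep "." ≠ "": always some
  let query_lower := PySem.Str.lower query
  let query_words : PySem.Set String := PySem.Set.ofList (PySem.Str.split₀ query_lower)
  let relevant := sentences.foldl (fun acc s =>
      let m := pvMatchesA query_words (PySem.Str.lower s)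
      if 0 < m then acc ++ [(m, PySem.Str.strip s)] else acc) ([] : List (Int × String))
  let relSorted := PySem.List.sorted relevant (fun p => p.1) true
  let fallback :=
    match pvFirstLongA sentences with
    | some r => r
    | none =>
      if 200 < PySem.Str.len context2 then PySem.Str.slice context2 none (some 200) ++ "..."
      else context2
  if relSorted ≠ [] then
    let answer := PySem.Str.join ". "
      (((PySem.List.slice relSorted none (some 3)).map (fun p => p.2)).filter (fun s => s ≠ ""))
    if answer ≠ "" then answer ++ "." else fallback
  else fallback

-- ===== PORT B =====
-- sum(1 for w in keywords if w in sentence_lower)   (keywords pre-filtered by length)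
def pvMatchesB (kws : List String) (sl : String) : Int :=
  kws.foldl (fun n w => if PySem.Str.isIn w sl then n + 1 else n) 0

-- while c > 0: ordered.extend(s for (m, s) in relevant if m == c); c -= 1
def pvCollectB (rel : List (Int × String)) : Nat → List String → List String
  | 0, acc => acc
  | c + 1, acc =>
    pvCollectB rel c (acc ++ (rel.filter (fun p => p.1 == ((c : Int) + 1))).map (fun p => p.2))

def format_faq_response_alt (context : String) (query : String) : String :=
  let context1 := PySem.Str.strip (PySem.Str.replace context "HOSPITAL INFORMATION" "")
  let context2 := PySem.Str.strip (PySem.Str.replace context1 "DEPARTMENTS:" "")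
  let sentences := (PySem.Str.split? context2 ".").getD []
  let keywords : PySem.Set String := PySem.Set.ofList
    ((PySem.Str.split₀ (PySem.Str.lower query)).filter (fun w => decide ((2 : Int) < PySem.Str.len w)))
  let st := sentences.foldl (fun (st : List (Int × String) × Int) s =>
      let m := pvMatchesB keywords (PySem.Str.lower s)
      if 0 < m then (st.1 ++ [(m, PySem.Str.strip s)], if st.2 < m then m else st.2) else st)
      (([] : List (Int × String)), (0 : Int))
  let fallback :=
    match (sentences.find? (fun s => decide ((20 : Int) < PySem.Str.len (PySem.Str.strip s)))).map
        (fun s => PySem.Str.strip s) with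
    | some t => t ++ "."
    | none =>
      if 200 < PySem.Str.len context2 then PySem.Str.slice context2 none (some 200) ++ "..."
      else context2
  if st.1 ≠ [] then
    let ordered := pvCollectB st.1 st.2.toNat []
    let answer := PySem.Str.join ". "
      ((PySem.List.slice ordered none (some 3)).filter (fun s => s ≠ ""))
    if answer ≠ "" then answer ++ "." else fallback
  else fallback

-- ===== PRECONDITION & SPEC =====
def Spec_format_faq_response (context : String) (query : String) (out : String) : Prop := out = format_faq_response_alt context query
instance (context : String) (query : String) (out : String) : Decidable (Spec_format_faq_response context query out) := by unfold Spec_format_faq_response; infer_instance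

-- ===== CLAIM (what is proved, stated in full; the proofs are below) =====
def Claim_equal_format_faq_response : Prop := ∀ (context : String) (query : String), Dom_format_faq_response context query → Spec_format_faq_response context query (format_faq_response context query)

-- ===== LEMMAS AND PROOFS =====

-- counting folds are countP
lemma pv_foldl_count (p : String → Bool) (ws : List String) (n : Int) :
    ws.foldl (fun n w => if p w then n + 1 else n) n = n + (ws.countP p : Int) := by
  induction ws generalizing n with
  | nil => simp
  | cons w ws ih =>
    simp only [List.foldl_cons, List.countP_cons, ih]
    by_cases h : p w = true <;> simp [h] <;> push_cast <;> ring

-- Set.ofList commutes with filter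
lemma pv_contains_filter (q : String → Bool) (acc : List String) (w : String) (hq : q w = true) :
    PySem.Set.contains (List.filter q acc) w = PySem.Set.contains acc w := by
  simp [PySem.Set.contains, List.mem_filter, hq]

lemma pv_filter_add (q : String → Bool) (acc : List String) (w : String) :
    List.filter q (PySem.Set.add acc w)
      = if q w then PySem.Set.add (List.filter q acc) w else List.filter q acc := by
  by_cases hq : q w = true
  · rw [if_pos hq]
    unfold PySem.Set.add
    rw [pv_contains_filter q acc w hq]
    by_cases hc : w ∈ acc <;> simp [PySem.Set.contains, hc, List.filter_append, hq]
  · rw [if_neg hq]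
    unfold PySem.Set.add
    by_cases hc : w ∈ acc <;> simp [PySem.Set.contains, hc, List.filter_append, hq]

lemma pv_ofList_filter_aux (q : String → Bool) (ws acc : List String) :
    List.foldl PySem.Set.add (List.filter q acc) (List.filter q ws)
      = List.filter q (List.foldl PySem.Set.add acc ws) := by
  induction ws generalizing acc with
  | nil => rfl
  | cons w ws ih =>
    by_cases hq : q w = true
    · simp only [List.filter_cons, hq, if_pos, List.foldl_cons]
      rw [← ih (PySem.Set.add acc w), pv_filter_add, if_pos hq]
    · simp only [List.filter_cons, hq, List.foldl_cons]
      simp only [Bool.false_eq_true, if_neg, not_false_iff]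
      rw [← ih (PySem.Set.add acc w), pv_filter_add, if_neg hq]

lemma pv_ofList_filter (q : String → Bool) (ws : List String) :
    PySem.Set.ofList (ws.filter q) = (PySem.Set.ofList ws).filter q := by
  have := pv_ofList_filter_aux q ws []
  simpa [PySem.Set.ofList, PySem.Set.empty] using this

-- the two matches counts agree
lemma pv_matches_eq (ws : List String) (sl : String) :
    pvMatchesA (PySem.Set.ofList ws) sl
      = pvMatchesB (PySem.Set.ofList
          (ws.filter (fun w => decide ((2 : Int) < PySem.Str.len w)))) sl := by
  unfold pvMatchesA pvMatchesB
  rw [pv_foldl_count, pv_foldl_count, pv_ofList_filter, List.countP_filter]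

-- B's fold: first component equals A's fold
lemma pv_fold_fst (f : String → Int) (ss : List String) (acc : List (Int × String)) (m0 : Int) :
    (ss.foldl (fun (st : List (Int × String) × Int) s =>
        if 0 < f s then (st.1 ++ [(f s, PySem.Str.strip s)], if st.2 < f s then f s else st.2)
        else st) (acc, m0)).1
      = ss.foldl (fun acc s =>
          if 0 < f s then acc ++ [(f s, PySem.Str.strip s)] else acc) acc := by
  induction ss generalizing acc m0 with
  | nil => rfl
  | cons s ss ih =>
    simp only [List.foldl_cons]
    by_cases h : 0 < f s <;> simp only [h, if_pos, if_neg, not_false_iff, ih]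

-- B's fold invariant: maxc is nonnegative and bounds all keys
lemma pv_fold_inv (f : String → Int) (ss : List String) (acc : List (Int × String)) (m0 : Int)
    (h0 : 0 ≤ m0) (hacc : ∀ p ∈ acc, 1 ≤ p.1 ∧ p.1 ≤ m0) :
    0 ≤ (ss.foldl (fun (st : List (Int × String) × Int) s =>
        if 0 < f s then (st.1 ++ [(f s, PySem.Str.strip s)], if st.2 < f s then f s else st.2)
        else st) (acc, m0)).2
    ∧ ∀ p ∈ (ss.foldl (fun (st : List (Int × String) × Int) s =>
        if 0 < f s then (st.1 ++ [(f s, PySem.Str.strip s)], if st.2 < f s then f s else st.2)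
        else st) (acc, m0)).1, 1 ≤ p.1 ∧ p.1 ≤ (ss.foldl (fun (st : List (Int × String) × Int) s =>
        if 0 < f s then (st.1 ++ [(f s, PySem.Str.strip s)], if st.2 < f s then f s else st.2)
        else st) (acc, m0)).2 := by
  induction ss generalizing acc m0 with
  | nil => exact ⟨h0, hacc⟩
  | cons s ss ih =>
    simp only [List.foldl_cons]
    by_cases h : 0 < f s
    · simp only [h, if_pos]
      apply ih
      · by_cases hlt : m0 < f s <;> simp [hlt] <;> omega
      · intro p hp
        rcases List.mem_append.mp hp with hp | hp
        · have := hacc p hp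
          by_cases hlt : m0 < f s <;> simp [hlt] <;> omega
        · simp at hp
          subst hp
          by_cases hlt : m0 < f s <;> simp [hlt] <;> omega
    · simp only [h, if_neg, not_false_iff]
      exact ih acc m0 h0 hacc

-- descending buckets
def pvBuckets (rel : List (Int × String)) : Nat → List (Int × String)
  | 0 => []
  | c + 1 => rel.filter (fun p => p.1 == ((c : Int) + 1)) ++ pvBuckets rel c

lemma pv_collect_spec (rel : List (Int × String)) (n : Nat) (acc : List String) :
    pvCollectB rel n acc = acc ++ (pvBuckets rel n).map (fun p => p.2) := by
  induction n generalizing acc with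
  | zero => simp [pvCollectB, pvBuckets]
  | succ c ih => simp [pvCollectB, pvBuckets, ih]

lemma pv_mem_buckets (rel : List (Int × String)) (n : Nat) (y : Int × String)
    (hy : y ∈ pvBuckets rel n) : 1 ≤ y.1 ∧ y.1 ≤ (n : Int) := by
  induction n with
  | zero => simp [pvBuckets] at hy
  | succ c ih =>
    simp only [pvBuckets, List.mem_append, List.mem_filter] at hy
    rcases hy with ⟨_, h⟩ | h
    · have := beq_iff_eq.mp h
      push_cast
      omega
    · have := ih h
      push_cast at this ⊢
      omega

lemma pv_buckets_append_gt (xs : List (Int × String)) (x : Int × String) (n : Nat)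
    (hx : (n : Int) < x.1) : pvBuckets (xs ++ [x]) n = pvBuckets xs n := by
  induction n with
  | zero => simp [pvBuckets]
  | succ c ih =>
    have hne : (x.1 == ((c : Int) + 1)) = false := by
      apply beq_eq_false_iff_ne.mpr
      push_cast at hx ⊢
      omega
    have ihc : pvBuckets (xs ++ [x]) c = pvBuckets xs c := by
      apply ih
      push_cast at hx ⊢
      omega
    simp [pvBuckets, List.filter_append, hne, ihc]

lemma pv_insertBy_append (before : (Int × String) → (Int × String) → Bool) (x : Int × String)
    (l1 l2 : List (Int × String)) (h : ∀ y ∈ l1, before x y = false) :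
    PySem.List.insertBy before x (l1 ++ l2) = l1 ++ PySem.List.insertBy before x l2 := by
  induction l1 with
  | nil => simp
  | cons y ys ih =>
    have hy : before x y = false := h y (by simp)
    simp only [List.cons_append, PySem.List.insertBy, hy]
    simp only [Bool.false_eq_true, if_neg, not_false_iff]
    rw [ih (fun z hz => h z (by simp [hz]))]

lemma pv_insertBy_head (before : (Int × String) → (Int × String) → Bool) (x : Int × String)
    (l : List (Int × String)) (h : ∀ y ∈ l, before x y = true) :
    PySem.List.insertBy before x l = x :: l := by
  cases l with
  | nil => rfl
  | cons y ys => simp [PySem.List.insertBy, h y (by simp)]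

-- inserting x into the bucket concatenation lands at the end of x's own bucket
lemma pv_insert_buckets (n : Nat) (x : Int × String) (xs : List (Int × String))
    (h1 : 1 ≤ x.1) (h2 : x.1 ≤ (n : Int)) :
    PySem.List.insertBy (fun a b => decide (b.1 < a.1)) x (pvBuckets xs n)
      = pvBuckets (xs ++ [x]) n := by
  induction n with
  | zero => omega
  | succ c ih =>
    by_cases hc : x.1 = (c : Int) + 1
    · have hfalse : ∀ y ∈ xs.filter (fun p => p.1 == ((c : Int) + 1)),
          (fun a b => decide (b.1 < a.1)) x y = false := by
        intro y hy
        have := beq_iff_eq.mp (List.mem_filter.mp hy).2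
        simp only [decide_eq_false_iff_not, not_lt]
        omega
      have htrue : ∀ y ∈ pvBuckets xs c, (fun a b => decide (b.1 < a.1)) x y = true := by
        intro y hy
        have := pv_mem_buckets xs c y hy
        simp only [decide_eq_true_eq]
        omega
      have hxf : ([x].filter (fun p => p.1 == ((c : Int) + 1))) = [x] := by
        simp [hc]
      rw [pvBuckets, pv_insertBy_append _ _ _ _ hfalse, pv_insertBy_head _ _ _ htrue]
      rw [pvBuckets, List.filter_append, hxf, pv_buckets_append_gt xs x c (by push_cast; omega)]
      simp
    · have hle : x.1 ≤ (c : Int) := by push_cast at h2 ⊢; omega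
      have hfalse : ∀ y ∈ xs.filter (fun p => p.1 == ((c : Int) + 1)),
          (fun a b => decide (b.1 < a.1)) x y = false := by
        intro y hy
        have := beq_iff_eq.mp (List.mem_filter.mp hy).2
        simp only [decide_eq_false_iff_not, not_lt]
        omega
      have hxf : ([x].filter (fun p => p.1 == ((c : Int) + 1))) = [] := by
        simp [hc]
      rw [pvBuckets, pv_insertBy_append _ _ _ _ hfalse, ih hle]
      rw [pvBuckets, List.filter_append, hxf]
      simp

-- stable reverse sort by match-count = descending bucket concatenation
lemma pv_sorted_eq_buckets (rel : List (Int × String)) (n : Nat)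
    (h : ∀ p ∈ rel, 1 ≤ p.1 ∧ p.1 ≤ (n : Int)) :
    PySem.List.sorted rel (fun p => p.1) true = pvBuckets rel n := by
  induction rel using List.reverseRecOn with
  | nil =>
    have hnil : pvBuckets ([] : List (Int × String)) n = [] := by
      induction n with
      | zero => simp [pvBuckets]
      | succ c ih => simp [pvBuckets, ih]
    simp [PySem.List.sorted, hnil]
  | append_singleton xs x ih =>
    rw [PySem.List.sorted_rev_eq_foldl_insertBy] at *
    rw [List.foldl_append]
    simp only [List.foldl_cons, List.foldl_nil]
    rw [ih (fun p hp => h p (by simp [hp]))]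
    exact pv_insert_buckets n x xs (h x (by simp)).1 (h x (by simp)).2

-- the fallback loop is find?-then-strip
lemma pv_firstLong_eq (ss : List String) :
    pvFirstLongA ss
      = ((ss.find? (fun s => decide ((20 : Int) < PySem.Str.len (PySem.Str.strip s)))).map
          (fun s => PySem.Str.strip s)).map (fun t => t ++ ".") := by
  induction ss with
  | nil => rfl
  | cons s rest ih =>
    by_cases h : (20 : Int) < PySem.Str.len (PySem.Str.strip s)
    · simp only [pvFirstLongA, if_pos h, List.find?_cons, decide_eq_true h]
      rfl
    · simp only [pvFirstLongA, if_neg h, List.find?_cons]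
      rw [decide_eq_false h]
      exact ih

-- ===== VERDICT (by name: the statement is the Claim_ definition above) =====
set_option maxHeartbeats 1000000 in
theorem format_faq_response_spec : Claim_equal_format_faq_response := by
  intro context query _
  unfold Spec_format_faq_response format_faq_response format_faq_response_alt
  simp only [pv_matches_eq]
  set c2 := PySem.Str.strip (PySem.Str.replace
    (PySem.Str.strip (PySem.Str.replace context "HOSPITAL INFORMATION" ""))
    "DEPARTMENTS:" "") with hc2
  set sentences := (PySem.Str.split? c2 ".").getD [] with hsent
  set kws : List String := PySem.Set.ofList
    ((PySem.Str.split₀ (PySem.Str.lower query)).filter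
      (fun w => decide ((2 : Int) < PySem.Str.len w))) with hkws
  set f : String → Int := fun s => pvMatchesB kws (PySem.Str.lower s) with hf
  obtain ⟨h0, hb⟩ := pv_fold_inv f sentences [] 0 le_rfl (by simp)
  rw [← pv_fold_fst f sentences [] 0]
  set st := sentences.foldl (fun (st : List (Int × String) × Int) s =>
      if 0 < f s then (st.1 ++ [(f s, PySem.Str.strip s)], if st.2 < f s then f s else st.2)
      else st) (([] : List (Int × String)), (0 : Int)) with hst
  set n := st.2.toNat with hn
  have hcast : (n : Int) = st.2 := Int.toNat_of_nonneg h0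
  have hb' : ∀ p ∈ st.1, 1 ≤ p.1 ∧ p.1 ≤ (n : Int) := by
    intro p hp
    rw [hcast]
    exact hb p hp
  rw [pv_sorted_eq_buckets st.1 n hb', pv_collect_spec st.1 n []]
  have hnil : (pvBuckets st.1 n = []) ↔ st.1 = [] := by
    rw [← pv_sorted_eq_buckets st.1 n hb']
    exact PySem.List.sorted_eq_nil_iff st.1 (fun p => p.1) true
  have hfb : (match pvFirstLongA sentences with
      | some r => r
      | none =>
        if 200 < PySem.Str.len c2 then PySem.Str.slice c2 none (some 200) ++ "..." else c2)
    = (match (sentences.find? (fun s =>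
          decide ((20 : Int) < PySem.Str.len (PySem.Str.strip s)))).map
          (fun s => PySem.Str.strip s) with
      | some t => t ++ "."
      | none =>
        if 200 < PySem.Str.len c2 then PySem.Str.slice c2 none (some 200) ++ "..." else c2) := by
    rw [pv_firstLong_eq sentences]
    cases sentences.find? (fun s => decide ((20 : Int) < PySem.Str.len (PySem.Str.strip s))) <;> rfl
  have hslice : PySem.List.slice ((pvBuckets st.1 n).map (fun p => p.2)) none (some 3)
      = (PySem.List.slice (pvBuckets st.1 n) none (some 3)).map (fun p => p.2) := by
    rw [PySem.List.slice_to _ (by norm_num), PySem.List.slice_to _ (by norm_num)]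
    simp [List.map_take]
  rw [hfb, List.nil_append, hslice]
  simp only [ne_eq, hnil]
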